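-- pv_equiv track=rewrite | github.com/patimo1/prisma-journal | app/app.py | _infer_sentiment
-- ===== SOURCE A (Python) =====
-- def _infer_sentiment(emotions):
--     if not emotions:
--         return "neutral"
--     positive = {"joy", "trust", "anticipation"}
--     negative = {"fear", "sadness", "anger", "disgust"}
--     seen = {e.get("emotion") for e in emotions if isinstance(e, dict)}
--     has_pos = any(e in positive for e in seen)
--     has_neg = any(e in negative for e in seen)
--     if has_pos and has_neg:
--         return "mixed"
--     if has_pos:
--         return "positive"
--     if has_neg:
--         return "negative"
--     return "neutral"
-- ===== SOURCE B (Python) =====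
-- _SENTIMENT_BIT = {"joy": 1, "trust": 1, "anticipation": 1,
--                   "fear": 2, "sadness": 2, "anger": 2, "disgust": 2}
-- _LABELS = ("neutral", "positive", "negative", "mixed")
--
-- def _infer_sentiment(emotions):
--     if not emotions:
--         return "neutral"
--     mask = 0
--     for e in emotions:
--         if isinstance(e, dict):
--             mask |= _SENTIMENT_BIT.get(e.get("emotion"), 0)
--     return _LABELS[mask]
-- ===== Notes on version B (the rewrite author's own statement) =====
-- stated objective: alternative
-- what changed: replaces the seen-set plus two any-scans and the four-way if-chain by a single OR-fold of a per-emotion bitmask (positive=1, negative=2) looked up in one dict, with the final label read from a table indexed by the mask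
import Mathlib
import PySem

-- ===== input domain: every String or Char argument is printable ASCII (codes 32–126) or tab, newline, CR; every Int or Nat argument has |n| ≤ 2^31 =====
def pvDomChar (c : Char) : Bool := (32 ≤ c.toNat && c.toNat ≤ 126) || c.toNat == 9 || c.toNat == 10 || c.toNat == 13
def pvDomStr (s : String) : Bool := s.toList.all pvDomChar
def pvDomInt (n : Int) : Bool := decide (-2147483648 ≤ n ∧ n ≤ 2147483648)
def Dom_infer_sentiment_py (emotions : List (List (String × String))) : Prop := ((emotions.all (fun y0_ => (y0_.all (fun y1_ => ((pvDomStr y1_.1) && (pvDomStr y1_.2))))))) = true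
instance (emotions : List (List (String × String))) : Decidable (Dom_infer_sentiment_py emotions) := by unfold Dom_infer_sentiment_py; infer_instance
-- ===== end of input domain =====

-- B replaces A's seen-set, its two any-scans and the four-way if-chain by a single
-- OR-fold of a per-emotion bitmask (positive=1, negative=2) read from one dict,
-- with the final label taken from a table indexed by the mask (objective: alternative).

-- ===== PORT A =====
-- 'e in positive' where e may be None (missing "emotion" key): None is in neither set.
def pvOptMem (v : Option String) (s : PySem.Set String) : Bool :=
  match v with
  | some x => PySem.Set.contains s x
  | none => false

def infer_sentiment_py (emotions : List (List (String × String))) : String :=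
  if emotions = [] then "neutral" else
  let positive : PySem.Set String := PySem.Set.ofList ["joy", "trust", "anticipation"]
  let negative : PySem.Set String := PySem.Set.ofList ["fear", "sadness", "anger", "disgust"]
  let seen : PySem.Set (Option String) :=
    PySem.Set.ofList (emotions.map (fun e => (PySem.Dict.mk e).get? "emotion"))
  let has_pos := seen.any (fun v => pvOptMem v positive)
  let has_neg := seen.any (fun v => pvOptMem v negative)
  if has_pos && has_neg then "mixed"
  else if has_pos then "positive"
  else if has_neg then "negative"
  else "neutral"

-- ===== PORT B =====
-- _SENTIMENT_BIT.get(v, 0): v may be None (missing key), which matches no string key.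
def pvBitGet (v : Option String) : Int :=
  match v with
  | some x => (PySem.Dict.mk [("joy", 1), ("trust", 1), ("anticipation", 1),
                             ("fear", 2), ("sadness", 2), ("anger", 2), ("disgust", 2)]).getD x 0
  | none => 0

def infer_sentiment_py_alt (emotions : List (List (String × String))) : String :=
  if emotions = [] then "neutral" else
  let labels : List String := ["neutral", "positive", "negative", "mixed"]
  let mask : Int := emotions.foldl
    (fun (m : Int) e => Int.lor m (pvBitGet ((PySem.Dict.mk e).get? "emotion"))) 0
  -- _LABELS[mask]: mask is always in {0,1,2,3}, so the tuple index never raises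
  (PySem.List.pyGet? labels mask).get!

-- ===== PRECONDITION & SPEC =====
def Spec_infer_sentiment_py (emotions : List (List (String × String))) (out : String) : Prop := out = infer_sentiment_py_alt emotions
instance (emotions : List (List (String × String))) (out : String) : Decidable (Spec_infer_sentiment_py emotions out) := by unfold Spec_infer_sentiment_py; infer_instance

-- ===== CLAIM (what is proved, stated in full; the proofs are below) =====
def Claim_equal_infer_sentiment_py : Prop := ∀ (emotions : List (List (String × String))), Dom_infer_sentiment_py emotions → Spec_infer_sentiment_py emotions (infer_sentiment_py emotions)

-- ===== LEMMAS AND PROOFS =====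

-- the mask encoding of a (has_pos, has_neg) pair
def maskOf (a b : Bool) : Int := Int.lor (if a then 1 else 0) (if b then 2 else 0)

theorem lor_maskOf (a b p q : Bool) :
    Int.lor (maskOf a b) (maskOf p q) = maskOf (a || p) (b || q) := by
  cases a <;> cases b <;> cases p <;> cases q <;> decide

-- the bitmask dict agrees with the two membership tests
theorem bit_eq (v : Option String) :
    pvBitGet v
      = maskOf (pvOptMem v (PySem.Set.ofList ["joy", "trust", "anticipation"]))
               (pvOptMem v (PySem.Set.ofList ["fear", "sadness", "anger", "disgust"])) := by
  cases v with
  | none => decide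
  | some x =>
    rcases Decidable.em (x = "joy") with h1 | h1; · subst h1; decide
    rcases Decidable.em (x = "trust") with h2 | h2; · subst h2; decide
    rcases Decidable.em (x = "anticipation") with h3 | h3; · subst h3; decide
    rcases Decidable.em (x = "fear") with h4 | h4; · subst h4; decide
    rcases Decidable.em (x = "sadness") with h5 | h5; · subst h5; decide
    rcases Decidable.em (x = "anger") with h6 | h6; · subst h6; decide
    rcases Decidable.em (x = "disgust") with h7 | h7; · subst h7; decide
    simp_all [pvBitGet, pvOptMem, PySem.Dict.getD, maskOf,
      Ne.symm h1, Ne.symm h2, Ne.symm h3, Ne.symm h4, Ne.symm h5, Ne.symm h6, Ne.symm h7,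
      PySem.Dict.get?, Int.lor]

-- any over set(xs) agrees with any over xs
theorem any_ofList {α : Type} [BEq α] [LawfulBEq α] (l : List α) (p : α → Bool) :
    (PySem.Set.ofList l).any p = l.any p := by
  rw [Bool.eq_iff_iff]
  simp only [List.any_eq_true]
  constructor
  · rintro ⟨x, hx, hp⟩
    exact ⟨x, (PySem.Set.mem_ofList l x).1 hx, hp⟩
  · rintro ⟨x, hx, hp⟩
    exact ⟨x, (PySem.Set.mem_ofList l x).2 hx, hp⟩

-- B's OR-fold computes the mask of the two any-scans
theorem fold_mask (P N : List (String × String) → Bool)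
    (h : ∀ e, pvBitGet ((PySem.Dict.mk e).get? "emotion") = maskOf (P e) (N e))
    (l : List (List (String × String))) (a b : Bool) :
    l.foldl (fun (m : Int) e => Int.lor m (pvBitGet ((PySem.Dict.mk e).get? "emotion"))) (maskOf a b)
      = maskOf (a || l.any P) (b || l.any N) := by
  induction l generalizing a b with
  | nil => simp
  | cons e t ih =>
    simp only [List.foldl_cons, List.any_cons, h e, lor_maskOf, ih]
    simp [Bool.or_assoc]

-- the label table read at maskOf agrees with A's if-chain
theorem table_eq (a b : Bool) :
    (PySem.List.pyGet? ["neutral", "positive", "negative", "mixed"] (maskOf a b)).get!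
      = (if a && b then "mixed" else if a then "positive" else if b then "negative" else "neutral") := by
  cases a <;> cases b <;> rfl

-- ===== VERDICT (by name: the statement is the Claim_ definition above) =====
theorem infer_sentiment_py_spec : Claim_equal_infer_sentiment_py := by
  intro emotions _
  unfold Spec_infer_sentiment_py infer_sentiment_py infer_sentiment_py_alt
  by_cases h : emotions = []
  · simp [h]
  · simp only [h, if_false]
    have h0 : (0 : Int) = maskOf false false := by decide
    rw [h0, fold_mask
        (fun e => pvOptMem ((PySem.Dict.mk e).get? "emotion")
          (PySem.Set.ofList ["joy", "trust", "anticipation"]))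
        (fun e => pvOptMem ((PySem.Dict.mk e).get? "emotion")
          (PySem.Set.ofList ["fear", "sadness", "anger", "disgust"]))
        (fun e => bit_eq _), table_eq]
    simp [any_ofList, List.any_map, Function.comp]
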